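-- pv_equiv track=rewrite | github.com/Foxify52/Loop-O-Matic | main.py | find_similar_beats
-- ===== SOURCE A (Python) =====
-- def find_similar_beats(beat_graph, current_beat, beat_match_length):
--     compare_list, similar_beats = [], []
--     for i in range(len(beat_graph) - (beat_match_length - 1)):
--         sequence = []
--         for j in range(beat_match_length):
--             if i + j != current_beat:
--                 sequence.append(beat_graph[i + j])
--         compare_list.append(sequence)
--     for i in range(len(compare_list)):
--         for j in range(i+1, len(compare_list)):
--             if compare_list[i] == compare_list[j]:
--                 similar_beats.append(compare_list[i])
--     return similar_beats
-- ===== SOURCE B (Python) =====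
-- def find_similar_beats(beat_graph, current_beat, beat_match_length):
--     # windows of length beat_match_length, with index current_beat skipped
--     seqs = [
--         [beat_graph[i + j] for j in range(beat_match_length) if i + j != current_beat]
--         for i in range(len(beat_graph) - (beat_match_length - 1))
--     ]
--     # one right-to-left pass with a hash map: for each position, how many
--     # equal sequences occur strictly to its right
--     counts = {}
--     later = []
--     for s in reversed(seqs):
--         key = tuple(s)
--         c = counts.get(key, 0)
--         later.append(c)
--         counts[key] = c + 1
--     later.reverse()
--     out = []
--     for s, c in zip(seqs, later):
--         out += [s] * c
--     return out
-- ===== Notes on version B (the rewrite author's own statement) =====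
-- stated objective: alternative
-- what changed: The quadratic pairwise comparison of window sequences is replaced by one right-to-left pass that counts, via a hash map keyed by the window tuple, how many equal windows lie to the right of each position, then emits each window that many times.
import Mathlib
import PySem

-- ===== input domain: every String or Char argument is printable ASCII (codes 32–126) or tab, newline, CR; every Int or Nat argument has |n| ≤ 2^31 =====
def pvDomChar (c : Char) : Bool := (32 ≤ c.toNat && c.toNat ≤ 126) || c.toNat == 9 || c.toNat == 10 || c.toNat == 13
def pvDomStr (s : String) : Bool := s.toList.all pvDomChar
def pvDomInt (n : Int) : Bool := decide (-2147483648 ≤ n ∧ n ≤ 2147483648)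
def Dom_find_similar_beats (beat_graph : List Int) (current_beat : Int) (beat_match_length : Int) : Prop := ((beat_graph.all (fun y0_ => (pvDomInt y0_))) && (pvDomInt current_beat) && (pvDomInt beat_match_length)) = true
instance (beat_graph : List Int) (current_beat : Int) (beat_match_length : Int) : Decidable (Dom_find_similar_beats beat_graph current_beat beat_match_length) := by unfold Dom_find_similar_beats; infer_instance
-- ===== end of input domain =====

-- B replaces A's pairwise comparison of the windows by one right-to-left counting pass
-- over a hash map keyed by the window (objective: alternative algorithm, same output).

-- ===== PORT A =====
-- beat_graph[i + j] is always in range when both loops run (for 1 ≤ beat_match_length the loop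
-- bounds force 0 ≤ i + j < len; for beat_match_length ≤ 0 the inner range is empty), so pyGetD is exact.
def find_similar_beats (beat_graph : List Int) (current_beat : Int) (beat_match_length : Int) : List (List Int) :=
  let compare_list :=
    (PySem.List.pyRange 0 ((beat_graph.length : Int) - (beat_match_length - 1)) 1).foldl
      (fun cl i =>
        cl ++ [ (PySem.List.pyRange 0 beat_match_length 1).foldl
                  (fun seq j =>
                    if i + j ≠ current_beat then seq ++ [PySem.List.pyGetD beat_graph (i + j) 0]
                    else seq) [] ]) []
  (PySem.List.pyRange 0 (compare_list.length : Int) 1).foldl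
    (fun sb i =>
      (PySem.List.pyRange (i + 1) (compare_list.length : Int) 1).foldl
        (fun sb j =>
          if PySem.List.pyGetD compare_list i [] = PySem.List.pyGetD compare_list j [] then
            sb ++ [PySem.List.pyGetD compare_list i []]
          else sb) sb) []

-- ===== PORT B =====
-- one window: [beat_graph[i + j] for j in range(beat_match_length) if i + j != current_beat]
def pvWindow (beat_graph : List Int) (current_beat : Int) (beat_match_length : Int) (i : Int) : List Int :=
  ((PySem.List.pyRange 0 beat_match_length 1).filter (fun j => decide (i + j ≠ current_beat))).map
    (fun j => PySem.List.pyGetD beat_graph (i + j) 0)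

-- the right-to-left counting pass ('for s in reversed(seqs): …'); Python's tuple(s) dict key
-- is represented by the list s itself (the tuple conversion is an identity on the value)
def pvLaterPass (seqs : List (List Int)) : PySem.Dict (List Int) Int × List Int :=
  seqs.reverse.foldl
    (fun st s =>
      let c := st.1.getD s 0
      (st.1.insert s (c + 1), st.2 ++ [c]))
    (PySem.Dict.empty, [])

def find_similar_beats_alt (beat_graph : List Int) (current_beat : Int) (beat_match_length : Int) : List (List Int) :=
  let seqs := (PySem.List.pyRange 0 ((beat_graph.length : Int) - (beat_match_length - 1)) 1).map
    (pvWindow beat_graph current_beat beat_match_length)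
  let later := (pvLaterPass seqs).2.reverse
  (seqs.zip later).foldl (fun out p => out ++ List.replicate p.2.toNat p.1) []

-- ===== PRECONDITION & SPEC =====
def Spec_find_similar_beats (beat_graph : List Int) (current_beat : Int) (beat_match_length : Int) (out : List (List Int)) : Prop := out = find_similar_beats_alt beat_graph current_beat beat_match_length
instance (beat_graph : List Int) (current_beat : Int) (beat_match_length : Int) (out : List (List Int)) : Decidable (Spec_find_similar_beats beat_graph current_beat beat_match_length out) := by unfold Spec_find_similar_beats; infer_instance

-- ===== CLAIM (what is proved, stated in full; the proofs are below) =====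
def Claim_equal_find_similar_beats : Prop := ∀ (beat_graph : List Int) (current_beat : Int) (beat_match_length : Int), Dom_find_similar_beats beat_graph current_beat beat_match_length → Spec_find_similar_beats beat_graph current_beat beat_match_length (find_similar_beats beat_graph current_beat beat_match_length)

-- ===== LEMMAS AND PROOFS =====

-- the common value of both programs: each window, repeated once per equal window to its right
def pvDupSpec : List (List Int) → List (List Int)
  | [] => []
  | x :: xs => List.replicate (xs.count x) x ++ pvDupSpec xs

-- the 'later' counts, with the current dict contents d as an offset
def pvLaterSpec (d : PySem.Dict (List Int) Int) : List (List Int) → List Int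
  | [] => []
  | x :: xs => ((xs.count x : Int) + d.getD x 0) :: pvLaterSpec d xs

-- invariant of B's counting pass: the dict holds the multiplicities of the processed suffix,
-- and the emitted counts are pvLaterSpec of it, in reverse
lemma pvLaterPass_spec (l : List (List Int)) (d : PySem.Dict (List Int) Int) (out0 : List Int) :
    (∀ k, (l.reverse.foldl
        (fun st s => let c := st.1.getD s 0; (st.1.insert s (c + 1), st.2 ++ [c]))
        (d, out0)).1.getD k 0 = d.getD k 0 + l.count k) ∧
    (l.reverse.foldl
        (fun st s => let c := st.1.getD s 0; (st.1.insert s (c + 1), st.2 ++ [c]))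
        (d, out0)).2 = out0 ++ (pvLaterSpec d l).reverse := by
  induction l generalizing out0 with
  | nil => simp [pvLaterSpec]
  | cons x xs ih =>
    obtain ⟨ih1, ih2⟩ := ih out0
    simp only [List.reverse_cons, List.foldl_append, List.foldl_cons, List.foldl_nil]
    constructor
    · intro k
      simp only [PySem.Dict.getD_insert, ih1, List.count_cons]
      by_cases hk : k = x
      · simp [hk]
        ring
      · simp [hk]
        exact Ne.intro fun a => hk (id (Eq.symm a))
    · simp only [ih2, ih1 x, pvLaterSpec, List.reverse_cons, List.append_assoc]
      rw [Int.add_comm]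

lemma pvLater_eq (l : List (List Int)) :
    (pvLaterPass l).2.reverse = pvLaterSpec PySem.Dict.empty l := by
  unfold pvLaterPass
  rw [(pvLaterPass_spec l PySem.Dict.empty []).2, List.nil_append, List.reverse_reverse]

-- counting the matches of cl[i] in cl[i+1:]
lemma pvCountP (cl : List (List Int)) (a : List Int) :
    (cl.countP (fun v => decide (a = v))) = cl.count a := by
  rw [List.count_eq_countP]
  refine List.countP_congr (fun v _ => ?_)
  rw [Bool.eq_iff_iff, decide_eq_true_iff, beq_iff_eq]
  exact ⟨fun h => (h.mpr rfl).symm, fun h => ⟨fun _ => rfl, fun _ => h.symm⟩⟩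

-- A's inner loop over j appends one copy of cl[i] per equal window to its right
lemma pvInner (cl : List (List Int)) (i : Int) (hi : 0 ≤ i) (sb : List (List Int)) :
    (PySem.List.pyRange (i + 1) (cl.length : Int) 1).foldl
      (fun sb j =>
        if PySem.List.pyGetD cl i [] = PySem.List.pyGetD cl j [] then
          sb ++ [PySem.List.pyGetD cl i []]
        else sb) sb
    = sb ++ List.replicate ((cl.drop (i + 1).toNat).count (PySem.List.pyGetD cl i []))
        (PySem.List.pyGetD cl i []) := by
  rw [PySem.List.foldl_append_ite]
  congr 1
  rw [List.map_const']
  congr 1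
  rw [← List.countP_eq_length_filter, ← pvCountP,
      ← PySem.List.map_pyGetD_pyRange' cl ([] : List Int) (a := i + 1) (by omega),
      List.countP_map]
  rfl

lemma pvFlat (cl : List (List Int)) :
    (List.range cl.length).flatMap
      (fun k => List.replicate ((cl.drop (k + 1)).count (cl.getD k [])) (cl.getD k []))
    = pvDupSpec cl := by
  induction cl with
  | nil => simp [pvDupSpec]
  | cons x xs ih =>
    rw [List.length_cons, List.range_succ_eq_map, List.flatMap_cons, List.flatMap_map]
    simp only [List.drop_succ_cons, List.getD_cons_succ, List.getD_cons_zero, List.drop_zero]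
    rw [ih]
    rfl

-- A's second double loop, on any window list cl, computes pvDupSpec cl
lemma pvA_eq_dupSpec (cl : List (List Int)) :
    (PySem.List.pyRange 0 (cl.length : Int) 1).foldl
      (fun sb i =>
        (PySem.List.pyRange (i + 1) (cl.length : Int) 1).foldl
          (fun sb j =>
            if PySem.List.pyGetD cl i [] = PySem.List.pyGetD cl j [] then
              sb ++ [PySem.List.pyGetD cl i []]
            else sb) sb) [] = pvDupSpec cl := by
  have hr : PySem.List.pyRange 0 (cl.length : Int) 1
      = (List.range cl.length).map (fun k : Nat => (k : Int)) := by
    simp [PySem.List.pyRange_zero_natCast, List.map_eq_flatMap]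
  rw [hr, List.foldl_map]
  have hb : ∀ (sb : List (List Int)) (k : Nat),
      (PySem.List.pyRange ((k : Int) + 1) (cl.length : Int) 1).foldl
        (fun sb j =>
          if PySem.List.pyGetD cl (k : Int) [] = PySem.List.pyGetD cl j [] then
            sb ++ [PySem.List.pyGetD cl (k : Int) []]
          else sb) sb
      = sb ++ List.replicate ((cl.drop (k + 1)).count (cl.getD k [])) (cl.getD k []) := by
    intro sb k
    rw [pvInner cl (k : Int) (by omega) sb]
    have h1 : ((k : Int) + 1).toNat = k + 1 := by omega
    simp [h1, PySem.List.pyGetD_natCast]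
  rw [PySem.List.foldl_congr_mem _ _
        (fun sb k => sb ++ List.replicate ((cl.drop (k + 1)).count (cl.getD k [])) (cl.getD k [])) _
        (fun sb k _ => hb sb k),
      PySem.List.foldl_append_eq_flatMap, List.nil_append, pvFlat]

-- B's final loop over zip emits exactly pvDupSpec
lemma pvAlt_eq_dupSpec (l : List (List Int)) :
    (l.zip (pvLaterSpec PySem.Dict.empty l)).foldl
      (fun out p => out ++ List.replicate p.2.toNat p.1) [] = pvDupSpec l := by
  rw [PySem.List.foldl_append_eq_flatMap, List.nil_append]
  induction l with
  | nil => rfl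
  | cons x xs ih =>
    simp only [pvLaterSpec, List.zip_cons_cons, List.flatMap_cons, ih, PySem.Dict.getD_empty]
    rw [show ((xs.count x : Int) + 0).toNat = xs.count x by omega]
    rfl

-- A's window construction equals B's
lemma pvCompare_eq (beat_graph : List Int) (current_beat : Int) (beat_match_length : Int) :
    (PySem.List.pyRange 0 ((beat_graph.length : Int) - (beat_match_length - 1)) 1).foldl
      (fun cl i =>
        cl ++ [ (PySem.List.pyRange 0 beat_match_length 1).foldl
                  (fun seq j =>
                    if i + j ≠ current_beat then seq ++ [PySem.List.pyGetD beat_graph (i + j) 0]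
                    else seq) [] ]) []
    = (PySem.List.pyRange 0 ((beat_graph.length : Int) - (beat_match_length - 1)) 1).map
        (pvWindow beat_graph current_beat beat_match_length) := by
  rw [PySem.List.foldl_append_singleton_eq_map, List.nil_append]
  refine List.map_congr_left (fun i _ => ?_)
  rw [PySem.List.foldl_append_ite]
  rfl

-- ===== VERDICT (by name: the statement is the Claim_ definition above) =====
theorem find_similar_beats_spec : Claim_equal_find_similar_beats := by
  intro bg cb L _
  show find_similar_beats bg cb L = find_similar_beats_alt bg cb L
  unfold find_similar_beats find_similar_beats_alt
  simp only [pvCompare_eq, pvA_eq_dupSpec, pvLater_eq, pvAlt_eq_dupSpec]
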